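-- pv_equiv track=rewrite | github.com/XudaW1/Mental-health | Practicum-Xuda Wang (2).py | detect_negation_with_keywords
-- ===== SOURCE A (Python) =====
-- mental_health_keywords = {
--     'Hopelessness': ['hopeless', 'worthless', 'empty', 'isolated', 'trapped', 'anxious', 'worried', 'fear', 'scared',
--                     'overwhelmed', 'stressed', 'burnout', 'pressure', 'exhausted'],
--     'Depression': ['depressed', 'sad', 'miserable', 'suicide', 'self-harm', 'kill', 'dying', 'death', 'end it all'],
--     'Positive': ['hopeful', 'happy', 'joyful', 'excited', 'optimistic', 'grateful', 'content', 'peaceful']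
-- }
--
-- negations = ['not', 'never', 'no', "don't", "doesn't", "isn't", "wasn't", "weren't", "can't", "couldn't", "dont", "doesnt", "isnt", "wasnt", "werent", "cant", "couldnt"]
--
-- safe_words = ['want', 'wish', 'prefer', 'would like']
--
-- def detect_negation_with_keywords(text):
--     words = text.split()
--     for i, word in enumerate(words):
--         if word in negations:
--             for j in range(i+1, min(i+5, len(words))):
--                 for category, keywords in mental_health_keywords.items():
--                     if words[j] in keywords:
--                         window = words[max(0, i-3):j+1]
--                         if any(safe in window for safe in safe_words):
--                             return 'Neutral'
--     return False
-- ===== SOURCE B (Python) =====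
-- mental_health_keywords = {
--     'Hopelessness': ['hopeless', 'worthless', 'empty', 'isolated', 'trapped', 'anxious', 'worried', 'fear', 'scared',
--                     'overwhelmed', 'stressed', 'burnout', 'pressure', 'exhausted'],
--     'Depression': ['depressed', 'sad', 'miserable', 'suicide', 'self-harm', 'kill', 'dying', 'death', 'end it all'],
--     'Positive': ['hopeful', 'happy', 'joyful', 'excited', 'optimistic', 'grateful', 'content', 'peaceful']
-- }
--
-- negations = ['not', 'never', 'no', "don't", "doesn't", "isn't", "wasn't", "weren't", "can't", "couldn't", "dont", "doesnt", "isnt", "wasnt", "werent", "cant", "couldnt"]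
--
-- safe_words = ['want', 'wish', 'prefer', 'would like']
--
-- _all_keywords = set()
-- for _kws in mental_health_keywords.values():
--     _all_keywords.update(_kws)
--
--
-- def detect_negation_with_keywords(text):
--     # Index positions first in one pass, then decide existence keyword-first.
--     words = text.split()
--     neg_pos = []
--     kw_pos = []
--     safe_pos = []
--     for idx, w in enumerate(words):
--         if w in negations:
--             neg_pos.append(idx)
--         if w in _all_keywords:
--             kw_pos.append(idx)
--         if w in safe_words:
--             safe_pos.append(idx)
--     for j in kw_pos:
--         for i in neg_pos:
--             if j - 4 <= i < j and any(max(0, i - 3) <= s <= j for s in safe_pos):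
--                 return 'Neutral'
--     return False
-- ===== Notes on version B (the rewrite author's own statement) =====
-- stated objective: alternative
-- what changed: B makes one indexing pass collecting negation/keyword/safe-word positions (keywords checked against a precomputed union set) and then decides existence keyword-first over those position lists, instead of A's enumerate-driven triple nested loop that rescans a 4-word range and a window slice per negation.
import Mathlib
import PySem

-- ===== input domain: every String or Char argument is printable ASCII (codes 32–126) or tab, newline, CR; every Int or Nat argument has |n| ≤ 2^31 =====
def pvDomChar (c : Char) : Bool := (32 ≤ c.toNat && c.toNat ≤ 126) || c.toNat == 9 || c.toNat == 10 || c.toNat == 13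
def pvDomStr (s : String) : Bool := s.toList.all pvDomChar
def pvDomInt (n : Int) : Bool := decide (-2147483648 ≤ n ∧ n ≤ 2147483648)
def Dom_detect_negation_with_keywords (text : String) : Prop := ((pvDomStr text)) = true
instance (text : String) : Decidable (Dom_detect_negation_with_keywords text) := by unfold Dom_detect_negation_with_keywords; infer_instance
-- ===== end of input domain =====

-- B indexes negation/keyword/safe positions in one pass and decides existence keyword-first,
-- replacing A's rescans of 4-word windows; objective: alternative decomposition (A returns
-- 'Neutral'/False in Python; both are ported as the Bool they are used as: true/false).

-- ===== PORT A =====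
def pvMHK : List (String × List String) := [
  ("Hopelessness", ["hopeless", "worthless", "empty", "isolated", "trapped", "anxious", "worried", "fear", "scared",
                    "overwhelmed", "stressed", "burnout", "pressure", "exhausted"]),
  ("Depression", ["depressed", "sad", "miserable", "suicide", "self-harm", "kill", "dying", "death", "end it all"]),
  ("Positive", ["hopeful", "happy", "joyful", "excited", "optimistic", "grateful", "content", "peaceful"])]

def pvNegations : List String := ["not", "never", "no", "don't", "doesn't", "isn't", "wasn't", "weren't", "can't",
  "couldn't", "dont", "doesnt", "isnt", "wasnt", "werent", "cant", "couldnt"]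

def pvSafeWords : List String := ["want", "wish", "prefer", "would like"]

-- literal port of A: enumerate-driven outer loop, range window, dict-items scan, slice window
-- (words[j] is ported as pyGetD with default ""; the default is unreachable since j < len(words))
def detect_negation_with_keywords (text : String) : Bool :=
  let words := PySem.Str.split₀ text
  (PySem.List.enumerate words 0).any (fun iw =>
    pvNegations.contains iw.2 &&
      (PySem.List.pyRange (iw.1 + 1) (min (iw.1 + 5) (words.length : Int)) 1).any (fun j =>
        pvMHK.any (fun ck =>
          ck.2.contains (PySem.List.pyGetD words j "") &&
            (pvSafeWords.any (fun safe =>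
              (PySem.List.slice words (some (max 0 (iw.1 - 3))) (some (j + 1))).contains safe)))))

-- ===== PORT B =====
def pvAllKeywords : PySem.Set String :=
  pvMHK.foldl (fun s ck => PySem.Set.update s ck.2) PySem.Set.empty

def detect_negation_with_keywords_alt (text : String) : Bool :=
  let words := PySem.Str.split₀ text
  let en := PySem.List.enumerate words 0
  let negPos := (en.filter (fun p => pvNegations.contains p.2)).map (·.1)
  let kwPos := (en.filter (fun p => PySem.Set.contains pvAllKeywords p.2)).map (·.1)
  let safePos := (en.filter (fun p => pvSafeWords.contains p.2)).map (·.1)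
  kwPos.any (fun j => negPos.any (fun i =>
    (decide (j - 4 ≤ i) && decide (i < j)) &&
      safePos.any (fun s => decide (max 0 (i - 3) ≤ s) && decide (s ≤ j))))

-- ===== PRECONDITION & SPEC =====
def Spec_detect_negation_with_keywords (text : String) (out : Bool) : Prop := out = detect_negation_with_keywords_alt text
instance (text : String) (out : Bool) : Decidable (Spec_detect_negation_with_keywords text out) := by unfold Spec_detect_negation_with_keywords; infer_instance

-- ===== CLAIM (what is proved, stated in full; the proofs are below) =====
def Claim_equal_detect_negation_with_keywords : Prop := ∀ (text : String), Dom_detect_negation_with_keywords text → Spec_detect_negation_with_keywords text (detect_negation_with_keywords text)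

-- ===== LEMMAS AND PROOFS =====

theorem mem_allkw (w : String) : PySem.Set.contains pvAllKeywords w = true ↔ ∃ ck ∈ pvMHK, w ∈ ck.2 := by
  simp [pvAllKeywords, pvMHK, List.foldl, PySem.Set.contains, PySem.Set.empty, or_assoc]

theorem mem_slice_iff (ws : List String) (a b : Int) (ha : 0 ≤ a) (hb : 0 ≤ b) (x : String) :
    x ∈ PySem.List.slice ws (some a) (some b) ↔
      ∃ s : Nat, a ≤ (s : Int) ∧ (s : Int) < b ∧ ∃ h : s < ws.length, ws[s] = x := by
  rw [PySem.List.slice_toNat ws ha hb]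
  simp only [List.mem_iff_getElem, List.length_take, List.length_drop, List.getElem_take, List.getElem_drop]
  constructor
  · rintro ⟨k, hk, rfl⟩
    exact ⟨a.toNat + k, by omega, by omega, by omega, rfl⟩
  · rintro ⟨s, h1, h2, h3, rfl⟩
    refine ⟨s - a.toNat, by omega, ?_⟩
    simp [show a.toNat + (s - a.toNat) = s from by omega]

theorem pyGetD_idx (ws : List String) (j : Int) (h0 : 0 ≤ j) (hl : j < ws.length) :
    PySem.List.pyGetD ws j "" = ws[j.toNat]'(by omega) := by
  rw [PySem.List.pyGetD_of_nonneg ws "" h0, List.getD_eq_getElem]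

theorem main_lemma (ws : List String) :
    ((PySem.List.enumerate ws 0).any (fun iw =>
      pvNegations.contains iw.2 &&
        (PySem.List.pyRange (iw.1 + 1) (min (iw.1 + 5) (ws.length : Int)) 1).any (fun j =>
          pvMHK.any (fun ck =>
            ck.2.contains (PySem.List.pyGetD ws j "") &&
              (pvSafeWords.any (fun safe =>
                (PySem.List.slice ws (some (max 0 (iw.1 - 3))) (some (j + 1))).contains safe)))))) =
    (((PySem.List.enumerate ws 0).filter (fun p => PySem.Set.contains pvAllKeywords p.2)).map (·.1)).any (fun j =>
      (((PySem.List.enumerate ws 0).filter (fun p => pvNegations.contains p.2)).map (·.1)).any (fun i =>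
        (decide (j - 4 ≤ i) && decide (i < j)) &&
          (((PySem.List.enumerate ws 0).filter (fun p => pvSafeWords.contains p.2)).map (·.1)).any (fun s =>
            decide (max 0 (i - 3) ≤ s) && decide (s ≤ j)))) := by
  rw [Bool.eq_iff_iff]
  simp only [List.any_eq_true, List.mem_map, List.mem_filter, Bool.and_eq_true, decide_eq_true_eq,
    PySem.List.mem_enumerate_iff, PySem.List.mem_pyRange_one, mem_allkw, List.contains_eq_mem, zero_add]
  constructor
  · rintro ⟨x, ⟨k, hk, rfl⟩, hneg, j, ⟨hj1, hj2⟩, ck, hck, hkw, safe, hsafemem, hwin⟩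
    rw [pyGetD_idx ws j (by omega) (by simp at hj2; omega)] at hkw
    rw [mem_slice_iff ws _ _ (by omega) (by omega)] at hwin
    obtain ⟨s, hs1, hs2, hsl, rfl⟩ := hwin
    have hjlen : j < (ws.length : Int) := by simp at hj2; omega
    refine ⟨j, ⟨(j, ws[j.toNat]'(by omega)), ⟨⟨j.toNat, by omega, by simp [Int.toNat_of_nonneg (by omega : (0:Int) ≤ j)]⟩, ck, hck, hkw⟩, rfl⟩,
      (k : Int), ⟨(k, ws[k]), ⟨⟨k, hk, rfl⟩, hneg⟩, rfl⟩, ⟨by simp at hj2; omega, by omega⟩,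
      (s : Int), ⟨((s : Int), ws[s]), ⟨⟨s, hsl, rfl⟩, hsafemem⟩, rfl⟩, by omega, by omega⟩
  · rintro ⟨j, ⟨a, ⟨⟨kj, hkj, rfl⟩, ck, hck, hkw⟩, rfl⟩, i, ⟨a2, ⟨⟨ki, hki, rfl⟩, hneg⟩, rfl⟩, ⟨hji1, hji2⟩, s, ⟨a3, ⟨⟨ks, hks, rfl⟩, hsafe⟩, rfl⟩, hs1, hs2⟩
    refine ⟨(ki, ws[ki]), ⟨ki, hki, rfl⟩, hneg, (kj : Int), ⟨by omega, by simp; omega⟩, ck, hck, ?_, ws[ks], hsafe, ?_⟩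
    · rw [pyGetD_idx ws kj (by omega) (by simp; omega)]
      simp [hkw]
    · rw [mem_slice_iff ws _ _ (by omega) (by omega)]
      exact ⟨ks, by omega, by omega, hks, rfl⟩

-- ===== VERDICT (by name: the statement is the Claim_ definition above) =====
theorem detect_negation_with_keywords_spec : Claim_equal_detect_negation_with_keywords := by
  intro text _
  unfold Spec_detect_negation_with_keywords detect_negation_with_keywords detect_negation_with_keywords_alt
  exact main_lemma (PySem.Str.split₀ text)
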